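-- pv_equiv track=rewrite | github.com/balannavin-cyber/meridian-engine | gamma_engine_telemetry_logger.py | classify_event_level
-- ===== SOURCE A (Python) =====
-- from typing import Any, Dict, List, Optional
--
-- def classify_event_level(
--     engine: Optional[str],
--     pipeline: Optional[str],
--     symbol_sync: Optional[str],
-- ) -> str:
--     values = [engine, pipeline, symbol_sync]
--
--     if any(v is None for v in values):
--         return "ERROR"
--
--     joined = " | ".join(values).upper()
--
--     if "ERROR" in joined or "FAILED" in joined:
--         return "ERROR"
--
--     if "STALE" in joined or "MISSING" in joined or "DRIFT" in joined:
--         return "WARN"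
--
--     if "HEALTHY" in joined or "OK" in joined or "CLOSED_OK" in joined or "STANDBY" in joined:
--         return "INFO"
--
--     return "INFO"
-- ===== SOURCE B (Python) =====
-- _KEYWORD_SCORE = {
--     "ERROR": 2,
--     "FAILED": 2,
--     "STALE": 1,
--     "MISSING": 1,
--     "DRIFT": 1,
-- }
--
-- _LEVELS = ("INFO", "WARN", "ERROR")
--
--
-- def classify_event_level(engine, pipeline, symbol_sync):
--     values = (engine, pipeline, symbol_sync)
--     if None in values:
--         return "ERROR"
--     score = max(
--         (sc for v in values for kw, sc in _KEYWORD_SCORE.items() if kw in v.upper()),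
--         default=0,
--     )
--     return _LEVELS[score]
-- ===== Notes on version B (the rewrite author's own statement) =====
-- stated objective: alternative
-- what changed: Replaces A's tiered early-return if-chain over one joined-and-uppercased string by per-keyword numeric severity scoring (keyword->score map) aggregated with max and a final table lookup; the dead HEALTHY/OK branch folds into score 0 = INFO.
import Mathlib
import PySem

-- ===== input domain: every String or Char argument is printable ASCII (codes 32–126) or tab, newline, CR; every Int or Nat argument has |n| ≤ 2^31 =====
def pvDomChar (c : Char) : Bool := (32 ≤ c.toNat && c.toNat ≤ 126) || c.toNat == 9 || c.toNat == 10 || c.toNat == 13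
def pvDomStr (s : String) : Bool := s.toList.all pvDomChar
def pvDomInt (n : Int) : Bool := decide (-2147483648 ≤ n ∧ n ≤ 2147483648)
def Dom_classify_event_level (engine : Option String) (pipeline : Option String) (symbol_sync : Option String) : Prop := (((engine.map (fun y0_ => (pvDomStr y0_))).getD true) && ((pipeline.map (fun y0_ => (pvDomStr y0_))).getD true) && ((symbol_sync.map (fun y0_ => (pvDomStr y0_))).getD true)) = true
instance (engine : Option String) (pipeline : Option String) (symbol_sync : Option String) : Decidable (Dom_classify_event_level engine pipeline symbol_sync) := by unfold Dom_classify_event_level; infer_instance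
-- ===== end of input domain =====

-- B replaces A's tiered if-chain over one joined string by per-keyword numeric severity
-- scores aggregated with max and a final table lookup; objective: alternative, same behaviour.

-- ===== PORT A =====
-- A joins the three values with " | ", uppercases, and tests keyword membership in
-- the joined string; the None-guard is the match's catch-all arm.
def classify_event_level (engine : Option String) (pipeline : Option String) (symbol_sync : Option String) : String :=
  match engine, pipeline, symbol_sync with
  | some e, some p, some s =>
    let joined := PySem.Str.upper (PySem.Str.join " | " [e, p, s])
    if PySem.Str.isIn "ERROR" joined || PySem.Str.isIn "FAILED" joined then "ERROR"
    else if PySem.Str.isIn "STALE" joined || PySem.Str.isIn "MISSING" joined || PySem.Str.isIn "DRIFT" joined then "WARN"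
    else if PySem.Str.isIn "HEALTHY" joined || PySem.Str.isIn "OK" joined || PySem.Str.isIn "CLOSED_OK" joined || PySem.Str.isIn "STANDBY" joined then "INFO"
    else "INFO"
  | _, _, _ => "ERROR"

-- ===== PORT B =====
-- keyword -> severity score (Python dict, ported as an insertion-order association list)
def pvKeywordScore : List (String × Int) :=
  [("ERROR", 2), ("FAILED", 2), ("STALE", 1), ("MISSING", 1), ("DRIFT", 1)]

def pvLevels : List String := ["INFO", "WARN", "ERROR"]

def classify_event_level_alt (engine : Option String) (pipeline : Option String) (symbol_sync : Option String) : String :=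
  let values : List (Option String) := [engine, pipeline, symbol_sync]
  if values.contains none then "ERROR"
  else
    -- max(sc for v in values for kw, sc in _KEYWORD_SCORE.items() if kw in v.upper()), default=0
    let score : Int := PySem.List.maxD
      (values.flatMap (fun v => pvKeywordScore.filterMap (fun p =>
        if PySem.Str.isIn p.1 (PySem.Str.upper (v.getD "")) then some p.2 else none))) id 0
    -- _LEVELS[score]; score is always 0, 1 or 2, so the IndexError arm is unreachable
    match PySem.List.pyGet? pvLevels score with
    | some l => l
    | none => ""

-- ===== PRECONDITION & SPEC =====
def Spec_classify_event_level (engine : Option String) (pipeline : Option String) (symbol_sync : Option String) (out : String) : Prop := out = classify_event_level_alt engine pipeline symbol_sync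
instance (engine : Option String) (pipeline : Option String) (symbol_sync : Option String) (out : String) : Decidable (Spec_classify_event_level engine pipeline symbol_sync out) := by unfold Spec_classify_event_level; infer_instance

-- ===== CLAIM (what is proved, stated in full; the proofs are below) =====
def Claim_equal_classify_event_level : Prop := ∀ (engine : Option String) (pipeline : Option String) (symbol_sync : Option String), Dom_classify_event_level engine pipeline symbol_sync → Spec_classify_event_level engine pipeline symbol_sync (classify_event_level engine pipeline symbol_sync)

-- ===== LEMMAS AND PROOFS =====

-- A prefix of u ++ (' ' :: z) that avoids ' ' cannot reach past u.
lemma pv_prefix_no_space {p u z : List Char} (hp : ' ' ∉ p) (h : p <+: u ++ (' ' :: z)) : p <+: u := by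
  induction u generalizing p with
  | nil =>
    cases p with
    | nil => exact List.nil_prefix
    | cons c p' =>
      rcases (List.cons_prefix_cons.mp h) with ⟨hc, -⟩
      exact absurd (hc ▸ List.mem_cons_self) hp
  | cons a u' ih =>
    cases p with
    | nil => exact List.nil_prefix
    | cons c p' =>
      rcases (List.cons_prefix_cons.mp h) with ⟨hc, htl⟩
      have hp' : ' ' ∉ p' := fun hm => hp (List.mem_cons_of_mem _ hm)
      exact List.cons_prefix_cons.mpr ⟨hc, ih hp' htl⟩

-- An infix of c :: l that avoids c and is nonempty is an infix of l.
lemma pv_infix_cons_of {p l : List Char} {c : Char} (h : p <:+: c :: l) (hc : c ∉ p) (hne : p ≠ []) : p <:+: l := by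
  rcases List.infix_cons_iff.mp h with hpre | hinf
  · cases p with
    | nil => exact absurd rfl hne
    | cons d p' =>
      rcases List.cons_prefix_cons.mp hpre with ⟨hd, -⟩
      exact absurd (hd ▸ List.mem_cons_self) hc
  · exact hinf

-- No keyword without ' ' and '|' can straddle the " | " separator.
lemma pv_infix_sep {p : List Char} (hsp : ' ' ∉ p) (hbar : '|' ∉ p) :
    ∀ x y : List Char, p <:+: x ++ (' ' :: '|' :: ' ' :: y) → p <:+: x ∨ p <:+: y := by
  by_cases hne : p = []
  · intro x y _; exact Or.inl (hne ▸ List.nil_infix)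
  · intro x y h
    induction x with
    | nil =>
      simp only [List.nil_append] at h
      exact Or.inr (pv_infix_cons_of (pv_infix_cons_of (pv_infix_cons_of h hsp hne) hbar hne) hsp hne)
    | cons a x' ih =>
      rcases List.infix_cons_iff.mp h with hpre | hinf
      · have : p <+: (a :: x') ++ (' ' :: '|' :: ' ' :: y) := by simpa using hpre
        exact Or.inl (pv_prefix_no_space hsp this).isInfix
      · rcases ih hinf with hx | hy
        · exact Or.inl (List.infix_cons hx)
        · exact Or.inr hy

-- Keyword membership in A ++ " | " ++ (B ++ " | " ++ C) is membership in one of the parts.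
lemma pv_isIn_join3 {w : List Char} (hsp : ' ' ∉ w) (hbar : '|' ∉ w) (A B C : List Char) :
    PySem.Chars.isIn w (A ++ ' ' :: '|' :: ' ' :: (B ++ ' ' :: '|' :: ' ' :: C)) =
      (PySem.Chars.isIn w A || PySem.Chars.isIn w B || PySem.Chars.isIn w C) := by
  rw [Bool.eq_iff_iff]
  simp only [PySem.Chars.isIn_iff_infix, Bool.or_eq_true]
  constructor
  · intro h
    rcases pv_infix_sep hsp hbar _ _ h with hA | h'
    · exact Or.inl (Or.inl hA)
    · rcases pv_infix_sep hsp hbar _ _ h' with hB | hC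
      · exact Or.inl (Or.inr hB)
      · exact Or.inr hC
  · rintro ((hA | hB) | hC)
    · exact List.infix_append_of_infix_left hA
    · exact List.infix_append_of_infix_right (List.infix_cons (List.infix_cons (List.infix_cons (List.infix_append_of_infix_left hB))))
    · exact List.infix_append_of_infix_right (List.infix_cons (List.infix_cons (List.infix_cons (List.infix_append_of_infix_right (List.infix_cons (List.infix_cons (List.infix_cons hC)))))))

-- The uppercased joined string of three parts, on the character level.
lemma pv_joined3 (A B C : List Char) :
    PySem.Chars.upper (PySem.Chars.join " | ".toList [A, B, C]) =
      PySem.Chars.upper A ++ ' ' :: '|' :: ' ' ::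
        (PySem.Chars.upper B ++ ' ' :: '|' :: ' ' :: PySem.Chars.upper C) := by
  simp only [PySem.Chars.join_cons_cons, PySem.Chars.join_singleton]
  simp [PySem.Chars.upper, List.map_append]
  decide

-- B's per-value comprehension over the keyword table, written out as blocks of scores.
lemma pv_filterMap_table (v : Option String) :
    pvKeywordScore.filterMap (fun p => if PySem.Str.isIn p.1 (PySem.Str.upper (v.getD "")) then some p.2 else none) =
      (if PySem.Str.isIn "ERROR" (PySem.Str.upper (v.getD "")) then [(2:Int)] else []) ++
      (if PySem.Str.isIn "FAILED" (PySem.Str.upper (v.getD "")) then [2] else []) ++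
      (if PySem.Str.isIn "STALE" (PySem.Str.upper (v.getD "")) then [1] else []) ++
      (if PySem.Str.isIn "MISSING" (PySem.Str.upper (v.getD "")) then [1] else []) ++
      (if PySem.Str.isIn "DRIFT" (PySem.Str.upper (v.getD "")) then [1] else []) := by
  simp only [pvKeywordScore, List.filterMap_cons, List.filterMap_nil]
  split_ifs <;> rfl

-- max of a list of 1s and 2s with default 0, written with the target booleans.
lemma pv_maxD_char (L : List Int) (h : ∀ x ∈ L, x = 1 ∨ x = 2) :
    PySem.List.maxD L id 0 = if (2:Int) ∈ L then 2 else if (1:Int) ∈ L then 1 else 0 := by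
  cases hm : PySem.List.max? L id with
  | none =>
    have hL : L = [] := (PySem.List.max?_eq_none_iff L id).mp hm
    subst hL; simp [PySem.List.maxD, hm]
  | some m =>
    have hmem : m ∈ L := PySem.List.max?_mem hm
    have hmax : ∀ y ∈ L, id y ≤ id m := PySem.List.max?_isMax hm
    have hm12 : m = 1 ∨ m = 2 := h m hmem
    simp only [PySem.List.maxD, hm, Option.getD_some]
    split_ifs with h2 h1
    · have := hmax 2 h2; simp only [id] at this; omega
    · have := hmax 1 h1; simp only [id] at this
      rcases hm12 with rfl | rfl
      · rfl
      · exact absurd hmem h2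
    · rcases hm12 with rfl | rfl
      · exact absurd hmem h1
      · exact absurd hmem h2

lemma pv_maxD_char' (L : List Int) (E W : Bool)
    (h : ∀ x ∈ L, x = 1 ∨ x = 2)
    (h2 : (2:Int) ∈ L ↔ E = true)
    (h1 : (1:Int) ∈ L ↔ W = true) :
    PySem.List.maxD L id 0 = if E then 2 else if W then 1 else 0 := by
  rw [pv_maxD_char L h]
  simp only [h2, h1]

-- ===== VERDICT (by name: the statement is the Claim_ definition above) =====
set_option maxHeartbeats 1600000 in
theorem classify_event_level_spec : Claim_equal_classify_event_level := by
  intro engine pipeline symbol_sync _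
  unfold Spec_classify_event_level
  match engine, pipeline, symbol_sync with
  | none, _, _ => rfl
  | some e, none, _ => rfl
  | some e, some p, none => rfl
  | some e, some p, some s =>
    show (let joined := PySem.Str.upper (PySem.Str.join " | " [e, p, s]); _) = _
    simp only [classify_event_level, classify_event_level_alt,
      List.contains_cons, List.contains_nil, List.flatMap_cons, List.flatMap_nil,
      List.append_nil, Bool.or_false]
    simp only [pv_filterMap_table]
    simp only [Option.getD_some]
    norm_num
    rw [pv_joined3 e.toList p.toList s.toList]
    simp only [pv_isIn_join3 (by decide : ' ' ∉ "ERROR".toList) (by decide : '|' ∉ "ERROR".toList),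
      pv_isIn_join3 (by decide : ' ' ∉ "FAILED".toList) (by decide : '|' ∉ "FAILED".toList),
      pv_isIn_join3 (by decide : ' ' ∉ "STALE".toList) (by decide : '|' ∉ "STALE".toList),
      pv_isIn_join3 (by decide : ' ' ∉ "MISSING".toList) (by decide : '|' ∉ "MISSING".toList),
      pv_isIn_join3 (by decide : ' ' ∉ "DRIFT".toList) (by decide : '|' ∉ "DRIFT".toList)]
    generalize PySem.Chars.isIn "ERROR".toList (PySem.Chars.upper e.toList) = e1
    generalize PySem.Chars.isIn "ERROR".toList (PySem.Chars.upper p.toList) = e2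
    generalize PySem.Chars.isIn "ERROR".toList (PySem.Chars.upper s.toList) = e3
    generalize PySem.Chars.isIn "FAILED".toList (PySem.Chars.upper e.toList) = f1
    generalize PySem.Chars.isIn "FAILED".toList (PySem.Chars.upper p.toList) = f2
    generalize PySem.Chars.isIn "FAILED".toList (PySem.Chars.upper s.toList) = f3
    generalize PySem.Chars.isIn "STALE".toList (PySem.Chars.upper e.toList) = s1
    generalize PySem.Chars.isIn "STALE".toList (PySem.Chars.upper p.toList) = s2
    generalize PySem.Chars.isIn "STALE".toList (PySem.Chars.upper s.toList) = s3
    generalize PySem.Chars.isIn "MISSING".toList (PySem.Chars.upper e.toList) = m1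
    generalize PySem.Chars.isIn "MISSING".toList (PySem.Chars.upper p.toList) = m2
    generalize PySem.Chars.isIn "MISSING".toList (PySem.Chars.upper s.toList) = m3
    generalize PySem.Chars.isIn "DRIFT".toList (PySem.Chars.upper e.toList) = d1
    generalize PySem.Chars.isIn "DRIFT".toList (PySem.Chars.upper p.toList) = d2
    generalize PySem.Chars.isIn "DRIFT".toList (PySem.Chars.upper s.toList) = d3
    rw [pv_maxD_char' _ ((e1 || e2 || e3) || (f1 || f2 || f3))
      ((s1 || s2 || s3) || (m1 || m2 || m3) || (d1 || d2 || d3))]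
    · simp only [Bool.or_eq_true]
      split_ifs <;> first | rfl | tauto
    · intro x hx
      simp only [List.mem_append, List.mem_ite_nil_right, List.mem_singleton] at hx
      tauto
    · simp only [List.mem_append, List.mem_ite_nil_right, List.mem_singleton]
      constructor
      · intro hx; norm_num at hx; simp only [Bool.or_eq_true]; tauto
      · intro hx; simp only [Bool.or_eq_true] at hx; norm_num; tauto
    · simp only [List.mem_append, List.mem_ite_nil_right, List.mem_singleton]
      constructor
      · intro hx; norm_num at hx; simp only [Bool.or_eq_true]; tauto
      · intro hx; simp only [Bool.or_eq_true] at hx; norm_num; tauto
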